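-- pv_equiv track=rewrite | github.com/LF-Lin/aviation-react | api/scripts/prepare_networks_data.py | _get_data_map
-- ===== SOURCE A (Python) =====
-- def _get_data_map(airports):
--     id_ap_map, cate_prov_map = {}, {}
--     for idx, row in enumerate(airports):
--         if row['airport_iata'] not in id_ap_map:
--             id_ap_map[row['airport_iata']] = len(id_ap_map)
--         if row['province'] not in cate_prov_map:
--             cate_prov_map[row['province']] = len(cate_prov_map)
--     return id_ap_map, cate_prov_map
-- ===== SOURCE B (Python) =====
-- def _get_data_map(airports):
--     def index_map(keys):
--         order = []
--         while keys:
--             head = keys[0]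
--             order.append(head)
--             keys = [k for k in keys[1:] if k != head]
--         return {k: i for i, k in enumerate(order)}
--     return (index_map([row['airport_iata'] for row in airports]),
--             index_map([row['province'] for row in airports]))
-- ===== Notes on version B (the rewrite author's own statement) =====
-- stated objective: alternative
-- what changed: Replaces A's single incremental pass with dict membership tests and len()-based index assignment by a repeated-filtering nub: take the first remaining key, filter out all its later duplicates, repeat until the list is empty, then enumerate the resulting unique-key order; no dict membership test or running size is used while deduplicating.
import Mathlib
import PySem

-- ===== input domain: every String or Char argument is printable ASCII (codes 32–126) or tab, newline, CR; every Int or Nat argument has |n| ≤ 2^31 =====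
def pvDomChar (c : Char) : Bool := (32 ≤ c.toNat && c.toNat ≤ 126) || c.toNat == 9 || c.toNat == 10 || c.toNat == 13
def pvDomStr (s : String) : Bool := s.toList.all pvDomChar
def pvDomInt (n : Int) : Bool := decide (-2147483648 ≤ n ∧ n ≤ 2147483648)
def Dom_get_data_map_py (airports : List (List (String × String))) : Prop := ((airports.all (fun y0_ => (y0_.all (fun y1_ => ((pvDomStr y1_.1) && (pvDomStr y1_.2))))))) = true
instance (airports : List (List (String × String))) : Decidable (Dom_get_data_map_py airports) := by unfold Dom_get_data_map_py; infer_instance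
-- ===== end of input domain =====

-- B replaces A's incremental membership/len pass by a repeated-filtering nub (take the first
-- remaining key, filter out its duplicates, repeat) followed by enumerate; objective: alternative algorithm, not faster.

-- ===== PORT A =====
-- row['airport_iata'] etc.: total getD form, valid under Pre_ (the key is present)
def get_data_map_py (airports : List (List (String × String))) : (List (String × Int)) × (List (String × Int)) :=
  let p := airports.foldl
    (fun (p : PySem.Dict String Int × PySem.Dict String Int) row =>
      ((let a := (PySem.Dict.mk row).getD "airport_iata" ""
        if p.1.contains a then p.1 else p.1.insert a (p.1.size : Int)),
       (let pr := (PySem.Dict.mk row).getD "province" ""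
        if p.2.contains pr then p.2 else p.2.insert pr (p.2.size : Int))))
    (PySem.Dict.empty, PySem.Dict.empty)
  (p.1.items, p.2.items)

-- ===== PORT B =====
-- the while loop of Source B's index_map: order.append(keys[0]); keys = [k for k in keys[1:] if k != head]
def pvNub : List String → List String
  | [] => []
  | x :: xs => x :: pvNub (xs.filter (fun y => y ≠ x))
termination_by l => l.length
decreasing_by
  simp only [List.length_cons, Nat.lt_succ_iff, List.length_unattach]
  exact le_trans (List.length_filter_le _ _) (by simp)

-- {k: i for i, k in enumerate(order)}
def pvIdxMap (l : List String) : List (String × Int) :=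
  (PySem.List.enumerate l 0).map (fun p => (p.2, p.1))

def get_data_map_py_alt (airports : List (List (String × String))) : (List (String × Int)) × (List (String × Int)) :=
  (pvIdxMap (pvNub (airports.map (fun row => (PySem.Dict.mk row).getD "airport_iata" ""))),
   pvIdxMap (pvNub (airports.map (fun row => (PySem.Dict.mk row).getD "province" ""))))

-- ===== PRECONDITION & SPEC =====
-- Pre_ excludes rows missing either key, on which Python A raises KeyError.
def Pre_get_data_map_py (airports : List (List (String × String))) : Prop :=
  (airports.all (fun row => (PySem.Dict.mk row).contains "airport_iata" && (PySem.Dict.mk row).contains "province")) = true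
instance (airports : List (List (String × String))) : Decidable (Pre_get_data_map_py airports) := by unfold Pre_get_data_map_py; infer_instance
def pvWitness_get_data_map_py : (List (List (String × String))) :=
  [[("airport_iata", "PEK"), ("province", "Beijing")], [("airport_iata", "SHA"), ("province", "Shanghai")]]

def Spec_get_data_map_py (airports : List (List (String × String))) (out : (List (String × Int)) × (List (String × Int))) : Prop := out = get_data_map_py_alt airports
instance (airports : List (List (String × String))) (out : (List (String × Int)) × (List (String × Int))) : Decidable (Spec_get_data_map_py airports out) := by unfold Spec_get_data_map_py; infer_instance

-- ===== CLAIM (what is proved, stated in full; the proofs are below) =====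
def Claim_equal_get_data_map_py : Prop := ∀ (airports : List (List (String × String))), Dom_get_data_map_py airports → Pre_get_data_map_py airports → Spec_get_data_map_py airports (get_data_map_py airports)

-- ===== LEMMAS AND PROOFS =====

theorem pv_fst_idxMap (l : List String) : (pvIdxMap l).map (·.1) = l := by
  simp only [pvIdxMap, List.map_map]
  exact PySem.List.map_snd_enumerate l 0

theorem pv_idxMap_append_singleton (l : List String) (x : String) :
    pvIdxMap (l ++ [x]) = pvIdxMap l ++ [(x, (l.length : Int))] := by
  simp [pvIdxMap, PySem.List.enumerate_append, PySem.List.enumerate_cons, PySem.List.enumerate_nil]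

theorem pv_contains_mkIdx (l : List String) (x : String) :
    (PySem.Dict.mk (pvIdxMap l)).contains x = l.contains x := by
  simp [PySem.Dict.contains_eq_decide_mem_keys, PySem.Dict.keys, pv_fst_idxMap]

theorem pv_size_mkIdx (l : List String) :
    (PySem.Dict.mk (pvIdxMap l)).size = l.length := by
  simp [PySem.Dict.size, pvIdxMap, PySem.List.length_enumerate]

theorem pv_insert_mkIdx (l : List String) (x : String) (v : Int) (h : x ∉ l) :
    (PySem.Dict.mk (pvIdxMap l)).insert x v = PySem.Dict.mk (pvIdxMap l ++ [(x, v)]) := by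
  apply PySem.Dict.ext
  rw [PySem.Dict.items_insert_of_not_contains]
  · rw [pv_contains_mkIdx]
    simpa using h

theorem pv_inv {A : Type} (f : A → String) (rows : List A) (l : List String) :
    (rows.foldl (fun d row =>
        let a := f row
        if PySem.Dict.contains d a then d else d.insert a (d.size : Int))
      (PySem.Dict.mk (pvIdxMap l))) =
      PySem.Dict.mk (pvIdxMap (rows.foldl (fun s row => PySem.Set.add s (f row)) l)) := by
  induction rows generalizing l with
  | nil => rfl
  | cons r rows ih =>
    simp only [List.foldl_cons]
    by_cases h : f r ∈ l
    · have hc : (PySem.Dict.mk (pvIdxMap l)).contains (f r) = true := by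
        rw [pv_contains_mkIdx]; simpa using h
      rw [if_pos hc]
      have hs : PySem.Set.add l (f r) = l := by simp [PySem.Set.add, h]
      rw [hs]
      exact ih l
    · have hc : (PySem.Dict.mk (pvIdxMap l)).contains (f r) = false := by
        rw [pv_contains_mkIdx]; simpa using h
      rw [if_neg (by simp [hc]), pv_insert_mkIdx l (f r) _ h, pv_size_mkIdx,
        ← pv_idxMap_append_singleton]
      have hs : PySem.Set.add l (f r) = l ++ [f r] := by
        simp [PySem.Set.add]; intro hk; exact absurd hk h
      rw [hs]
      exact ih (l ++ [f r])

theorem pv_column (rows : List (List (String × String))) (key : String) :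
    (rows.foldl (fun d row =>
        let a := (PySem.Dict.mk row).getD key ""
        if PySem.Dict.contains d a then d else d.insert a (d.size : Int))
      PySem.Dict.empty).items =
    pvIdxMap (PySem.Set.ofList (rows.map (fun row => (PySem.Dict.mk row).getD key ""))) := by
  have hstart : (PySem.Dict.empty : PySem.Dict String Int) = PySem.Dict.mk (pvIdxMap []) := rfl
  rw [hstart, pv_inv (fun row => (PySem.Dict.mk row).getD key "") rows []]
  congr 1
  rw [PySem.Set.ofList_eq_foldl, List.foldl_map]; rfl

theorem pv_discard_eq_filter (l : List String) (x : String) :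
    PySem.Set.discard l x = l.filter (fun y => decide (y ≠ x)) := by
  simp only [PySem.Set.discard]
  apply List.filter_congr
  intro a _
  by_cases h : a = x <;> simp [h]

theorem pv_filter_ofList (p : String → Bool) (xs : List String) :
    (PySem.Set.ofList xs).filter p = PySem.Set.ofList (xs.filter p) := by
  induction xs with
  | nil => rfl
  | cons y ys ih =>
    rw [PySem.Set.ofList_cons, pv_discard_eq_filter]
    by_cases hp : p y = true
    · rw [List.filter_cons_of_pos hp, List.filter_cons_of_pos hp, PySem.Set.ofList_cons,
        pv_discard_eq_filter, ← ih, List.filter_comm]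
    · rw [List.filter_cons_of_neg (by simpa using hp), List.filter_cons_of_neg (by simpa using hp),
        List.filter_comm, ih]
      apply List.filter_eq_self.2
      intro a ha
      have : a ∈ ys.filter p := (PySem.Set.mem_ofList _ _).1 (by simpa using ha)
      have hpa : p a = true := (List.mem_filter.1 this).2
      simp only [decide_eq_true_eq]
      intro he
      rw [he] at hpa
      exact hp hpa

theorem pv_nub_eq_ofList : ∀ (l : List String), pvNub l = PySem.Set.ofList l
  | [] => by simp [pvNub]
  | x :: xs => by
    simp only [pvNub]
    rw [pv_nub_eq_ofList (xs.filter (fun y => decide (y ≠ x))),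
      ← pv_filter_ofList, PySem.Set.ofList_cons, pv_discard_eq_filter]
termination_by l => l.length
decreasing_by
  simp only [List.length_cons, Nat.lt_succ_iff]
  exact List.length_filter_le _ _

-- ===== VERDICT (by name: the statement is the Claim_ definition above) =====
theorem get_data_map_py_spec : Claim_equal_get_data_map_py := by
  intro airports _ _
  unfold Spec_get_data_map_py get_data_map_py get_data_map_py_alt
  rw [PySem.List.foldl_prod_mk
      (f := fun d row => let a := (PySem.Dict.mk row).getD "airport_iata" ""
            if PySem.Dict.contains d a then d else d.insert a (d.size : Int))
      (g := fun d row => let pr := (PySem.Dict.mk row).getD "province" ""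
            if PySem.Dict.contains d pr then d else d.insert pr (d.size : Int))]
  rw [pv_nub_eq_ofList, pv_nub_eq_ofList]
  exact Prod.ext (pv_column airports "airport_iata") (pv_column airports "province")
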